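-- pv_equiv track=rewrite | github.com/usrigit/learnPython | commons/Helper.py | merge_dict_with_sub_dict
-- ===== SOURCE A (Python) =====
-- from collections import OrderedDict
--
-- def merge_dict_with_sub_dict(dict1, dict2):
--     final_dict = {}
--     for k in set().union(dict1, dict2):
--         val = OrderedDict()
--         sub_d1 = dict1.get(k)
--         sub_d2 = dict2.get(k)
--
--         if sub_d1:
--             val.update(sub_d1)
--         if sub_d2:
--             val.update(sub_d2)
--         final_dict.update({k: val})
--     return final_dict
-- ===== SOURCE B (Python) =====
-- from collections import OrderedDict
--
-- def merge_dict_with_sub_dict(dict1, dict2):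
--     result = {}
--     for k, v in dict1.items():
--         result[k] = OrderedDict(v) if v else OrderedDict()
--     for k, v in dict2.items():
--         if k not in result:
--             result[k] = OrderedDict()
--         if v:
--             result[k].update(v)
--     return result
-- ===== Notes on version B (the rewrite author's own statement) =====
-- stated objective: simpler
-- what changed: A builds the key union as a set and, for each union key, looks up both dicts to assemble the merged sub-dict; B drops the union entirely and makes two single-dict passes, copying dict1's sub-dicts first and then folding dict2's entries into the growing result.
import Mathlib
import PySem

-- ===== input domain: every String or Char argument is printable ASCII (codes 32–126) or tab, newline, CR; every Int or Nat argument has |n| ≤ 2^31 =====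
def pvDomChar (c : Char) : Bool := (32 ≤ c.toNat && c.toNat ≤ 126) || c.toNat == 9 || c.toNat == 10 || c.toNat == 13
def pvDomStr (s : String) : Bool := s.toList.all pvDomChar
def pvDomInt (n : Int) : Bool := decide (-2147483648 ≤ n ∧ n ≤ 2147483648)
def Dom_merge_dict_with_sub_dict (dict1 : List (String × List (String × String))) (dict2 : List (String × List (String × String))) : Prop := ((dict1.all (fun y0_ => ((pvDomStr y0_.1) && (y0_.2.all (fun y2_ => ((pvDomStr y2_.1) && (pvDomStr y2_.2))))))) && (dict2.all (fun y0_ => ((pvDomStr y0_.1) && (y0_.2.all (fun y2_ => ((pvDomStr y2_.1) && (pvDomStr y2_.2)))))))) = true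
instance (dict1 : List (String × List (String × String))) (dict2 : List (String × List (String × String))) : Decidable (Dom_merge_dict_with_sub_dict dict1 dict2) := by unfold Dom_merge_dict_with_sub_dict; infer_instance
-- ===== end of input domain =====

-- B replaces A's single pass over the key union (with a lookup into both dicts per key) by two
-- single-dict passes that build the result incrementally (objective: simpler, same cost).
-- Both functions receive dicts; the association lists are read with Python's dict(…) semantics
-- (duplicate keys: first position, last value), which pvToDict makes explicit for both ports.

-- shared input decoding: the Lean association list as the Python dict the function receives
def pvToDict (l : List (String × List (String × String))) : PySem.Dict String (PySem.Dict String String) :=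
  PySem.Dict.ofList (l.map (fun p => (p.1, PySem.Dict.ofList p.2)))

-- ===== PORT A =====
def merge_dict_with_sub_dict (dict1 : List (String × List (String × String))) (dict2 : List (String × List (String × String))) : List (String × List (String × String)) :=
  let d1 := pvToDict dict1
  let d2 := pvToDict dict2
  -- set().union(dict1, dict2); the result dict is compared ignoring key order, so first-insertion order is faithful
  let ks := PySem.Set.update (PySem.Set.update (PySem.Set.empty : PySem.Set String) d1.keys) d2.keys
  let finalDict := ks.foldl
    (fun fd k =>
      let val : PySem.Dict String String := PySem.Dict.empty
      let val := match d1.get? k with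
        | some v => if v.items.isEmpty then val else val.update v.items
        | none => val
      let val := match d2.get? k with
        | some v => if v.items.isEmpty then val else val.update v.items
        | none => val
      fd.insert k val)
    PySem.Dict.empty
  finalDict.items.map (fun p => (p.1, p.2.items))

-- ===== PORT B =====
def merge_dict_with_sub_dict_alt (dict1 : List (String × List (String × String))) (dict2 : List (String × List (String × String))) : List (String × List (String × String)) :=
  let d1 := pvToDict dict1
  let d2 := pvToDict dict2
  let result := d1.items.foldl
    (fun r kv => r.insert kv.1 (if kv.2.items.isEmpty then PySem.Dict.empty else kv.2))
    PySem.Dict.empty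
  let result := d2.items.foldl
    (fun r kv =>
      let r := if r.contains kv.1 then r else r.insert kv.1 PySem.Dict.empty
      if kv.2.items.isEmpty then r else r.modify kv.1 PySem.Dict.empty (fun cur => cur.update kv.2.items))
    result
  result.items.map (fun p => (p.1, p.2.items))

-- ===== PRECONDITION & SPEC =====
def Spec_merge_dict_with_sub_dict (dict1 : List (String × List (String × String))) (dict2 : List (String × List (String × String))) (out : List (String × List (String × String))) : Prop := out = merge_dict_with_sub_dict_alt dict1 dict2
instance (dict1 : List (String × List (String × String))) (dict2 : List (String × List (String × String))) (out : List (String × List (String × String))) : Decidable (Spec_merge_dict_with_sub_dict dict1 dict2 out) := by unfold Spec_merge_dict_with_sub_dict; infer_instance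

-- ===== CLAIM (what is proved, stated in full; the proofs are below) =====
def Claim_equal_merge_dict_with_sub_dict : Prop := ∀ (dict1 : List (String × List (String × String))) (dict2 : List (String × List (String × String))), Dom_merge_dict_with_sub_dict dict1 dict2 → Spec_merge_dict_with_sub_dict dict1 dict2 (merge_dict_with_sub_dict dict1 dict2)

-- ===== LEMMAS AND PROOFS =====
def pvLook {ν : Type} : List (String × ν) → String → Option ν
  | [], _ => none
  | p :: rest, k => if p.1 == k then some p.2 else pvLook rest k

def pvStep (r : PySem.Dict String (PySem.Dict String String)) (kv : String × PySem.Dict String String) : PySem.Dict String (PySem.Dict String String) :=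
  let r := if r.contains kv.1 then r else r.insert kv.1 PySem.Dict.empty
  if kv.2.items.isEmpty then r else r.modify kv.1 PySem.Dict.empty (fun cur => cur.update kv.2.items)

lemma pvStep_getD_self (r : PySem.Dict String (PySem.Dict String String)) (a : String) (v : PySem.Dict String String) :
    (pvStep r (a, v)).getD a PySem.Dict.empty =
      if v.items.isEmpty then r.getD a PySem.Dict.empty
      else (r.getD a PySem.Dict.empty).update v.items := by
  by_cases hc : r.contains a = true
  · simp only [pvStep, hc, if_true]
    by_cases he : v.items.isEmpty
    · simp [he]
    · simp [he]
  · have hc' : r.contains a = false := by simpa using hc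
    have h0 : r.getD a PySem.Dict.empty = PySem.Dict.empty := PySem.Dict.getD_of_not_contains r _ hc'
    simp only [pvStep, hc', if_false, Bool.false_eq_true]
    by_cases he : v.items.isEmpty
    · simp [he, h0]
    · simp [he, h0]

lemma pvStep_getD_ne (r : PySem.Dict String (PySem.Dict String String)) (a k : String) (v : PySem.Dict String String)
    (hne : k ≠ a) :
    (pvStep r (a, v)).getD k PySem.Dict.empty = r.getD k PySem.Dict.empty := by
  by_cases hc : r.contains a = true
  · simp only [pvStep, hc, if_true]
    by_cases he : v.items.isEmpty
    · simp [he]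
    · simp [he, PySem.Dict.getD_modify, hne]
  · have hc' : r.contains a = false := by simpa using hc
    simp only [pvStep, hc', if_false, Bool.false_eq_true]
    by_cases he : v.items.isEmpty
    · simp [he, PySem.Dict.getD_insert, hne]
    · simp [he, PySem.Dict.getD_modify, PySem.Dict.getD_insert, hne]

lemma pvLook_not_mem {ν : Type} (l : List (String × ν)) (k : String) (h : k ∉ l.map Prod.fst) :
    pvLook l k = none := by
  induction l with
  | nil => rfl
  | cons q t ih =>
    simp only [List.map_cons, List.mem_cons, not_or] at h
    simp only [pvLook]
    rw [if_neg (fun hb => h.1 (beq_iff_eq.mp hb).symm)]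
    exact ih h.2

lemma pass2_getD (l : List (String × PySem.Dict String String)) (hl : (l.map Prod.fst).Nodup)
    (r : PySem.Dict String (PySem.Dict String String)) (k : String) :
    (l.foldl pvStep r).getD k PySem.Dict.empty =
      match pvLook l k with
      | none => r.getD k PySem.Dict.empty
      | some v => if v.items.isEmpty then r.getD k PySem.Dict.empty
                  else (r.getD k PySem.Dict.empty).update v.items := by
  induction l generalizing r with
  | nil => rfl
  | cons p rest ih =>
    obtain ⟨a, v⟩ := p
    simp only [List.map_cons, List.nodup_cons] at hl
    obtain ⟨ha, hrest⟩ := hl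
    rw [List.foldl_cons, ih hrest]
    by_cases hk : k = a
    · subst hk
      rw [pvLook_not_mem rest k ha]
      simp only [pvLook, beq_self_eq_true, if_true]
      exact pvStep_getD_self r k v
    · have : pvLook ((a, v) :: rest) k = pvLook rest k := by
        simp only [pvLook]; rw [if_neg (fun hb => hk (beq_iff_eq.mp hb).symm)]
      rw [this, pvStep_getD_ne r a k v hk]

lemma pvStep_keys (r : PySem.Dict String (PySem.Dict String String)) (a : String) (v : PySem.Dict String String) :
    (pvStep r (a, v)).keys = PySem.Set.add r.keys a := by
  by_cases hc : r.contains a = true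
  · have hmem : a ∈ r.keys := (PySem.Dict.contains_iff_mem_keys r a).mp hc
    rw [PySem.Set.add_of_mem hmem]
    simp only [pvStep, hc, if_true]
    by_cases he : v.items.isEmpty
    · simp [he]
    · simp only [he, if_false, Bool.false_eq_true, PySem.Dict.keys_modify]
      rw [PySem.Dict.keys_insert_of_contains]
      exact hc
  · have hc' : r.contains a = false := by simpa using hc
    have hnm : a ∉ r.keys := fun h => by simp [(PySem.Dict.contains_iff_mem_keys r a).mpr h] at hc'
    rw [PySem.Set.add_of_not_mem hnm]
    simp only [pvStep, hc', if_false, Bool.false_eq_true]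
    by_cases he : v.items.isEmpty
    · simp [he, PySem.Dict.keys_insert_of_not_contains r _ hc']
    · simp only [he, if_false, Bool.false_eq_true, PySem.Dict.keys_modify]
      rw [PySem.Dict.keys_insert_of_contains, PySem.Dict.keys_insert_of_not_contains r _ hc']
      exact PySem.Dict.contains_insert_self r a PySem.Dict.empty

lemma pass2_keys (l : List (String × PySem.Dict String String)) (r : PySem.Dict String (PySem.Dict String String)) :
    (l.foldl pvStep r).keys = PySem.Set.update r.keys (l.map Prod.fst) := by
  induction l generalizing r with
  | nil => rfl
  | cons p rest ih =>
    obtain ⟨a, v⟩ := p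
    rw [List.foldl_cons, ih, List.map_cons, PySem.Set.update_cons, pvStep_keys]

lemma values_foldl_insert_sub {κ ν : Type} [BEq κ] [LawfulBEq κ] (l : List (κ × ν)) (d : PySem.Dict κ ν) (w : ν)
    (h : w ∈ (l.foldl (fun d p => d.insert p.1 p.2) d).values) : w ∈ d.values ∨ w ∈ l.map Prod.snd := by
  induction l generalizing d with
  | nil => exact Or.inl h
  | cons p rest ih =>
    rcases ih (d.insert p.1 p.2) h with h' | h'
    · rcases PySem.Dict.mem_values_insert d p.1 p.2 w h' with h'' | h''
      · exact Or.inr (by simp [h''])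
      · exact Or.inl h''
    · exact Or.inr (by simp; right; simpa using h')

lemma values_nodup_pvToDict (l : List (String × List (String × String)))
    (k : String) (v : PySem.Dict String String) (h : (pvToDict l).get? k = some v) :
    v.keys.Nodup := by
  have hv : v ∈ (pvToDict l).values := by
    have := PySem.Dict.mem_items_of_get?_eq_some _ h
    simp only [PySem.Dict.values]
    exact List.mem_map.mpr ⟨(k, v), this, rfl⟩
  have : v ∈ (PySem.Dict.empty : PySem.Dict String (PySem.Dict String String)).values ∨
      v ∈ (l.map (fun p => (p.1, PySem.Dict.ofList p.2))).map Prod.snd :=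
    values_foldl_insert_sub _ _ _ (by exact hv)
  rcases this with h' | h'
  · cases h'
  · rw [List.map_map] at h'
    rcases List.mem_map.mp h' with ⟨p, _, hp⟩
    rw [← hp]
    exact PySem.Dict.nodup_keys_ofList _
lemma update_empty_eq (v : PySem.Dict String String) (h : v.keys.Nodup) :
    PySem.Dict.empty.update v.items = v := by
  apply PySem.Dict.ext
  show (v.items.foldl (fun d p => d.insert p.1 p.2) PySem.Dict.empty).items = v.items
  have := PySem.Dict.items_foldl_insert_fresh (l := v.items) (k := Prod.fst) (v := Prod.snd)
    (d := (PySem.Dict.empty : PySem.Dict String String))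
    (by intro a _; exact PySem.Dict.contains_empty _)
    (by simpa [PySem.Dict.keys] using h)
  simpa using this

lemma itemsA (f : String → PySem.Dict String String) (ks : PySem.Set String) (hnd : ks.Nodup) :
    (ks.foldl (fun fd k => fd.insert k (f k)) PySem.Dict.empty).items
      = ks.map (fun k => (k, f k)) := by
  have := PySem.Dict.items_foldl_insert_fresh (l := ks) (k := fun a => a) (v := f)
    (d := (PySem.Dict.empty : PySem.Dict String (PySem.Dict String String)))
    (by intro a _; exact PySem.Dict.contains_empty _)
    (by simpa using hnd)
  simpa using this

lemma pvLook_eq_get? {ν : Type} (l : List (String × ν)) (k : String) :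
    pvLook l k = (PySem.Dict.mk l).get? k := by
  induction l with
  | nil => rfl
  | cons p rest ih => rw [show (p = (p.1, p.2)) from rfl, PySem.Dict.get?_mk_cons]; simp [pvLook, ih]

def pvVal1 (d1 : PySem.Dict String (PySem.Dict String String)) (k : String) : PySem.Dict String String :=
  match d1.get? k with
  | some v => if v.items.isEmpty then PySem.Dict.empty else v
  | none => PySem.Dict.empty

-- the merged value A computes for key k (zeta-normal form of A's loop body)
def pvMval (d1 d2 : PySem.Dict String (PySem.Dict String String)) (k : String) : PySem.Dict String String :=
  let v0 : PySem.Dict String String := match d1.get? k with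
    | some v => if v.items.isEmpty then PySem.Dict.empty else PySem.Dict.empty.update v.items
    | none => PySem.Dict.empty
  match d2.get? k with
  | some v => if v.items.isEmpty then v0 else v0.update v.items
  | none => v0

lemma getD_R1 (d1 : PySem.Dict String (PySem.Dict String String)) (hnd : d1.keys.Nodup) (k : String) :
    (d1.items.foldl (fun r kv => r.insert kv.1 (if kv.2.items.isEmpty then PySem.Dict.empty else kv.2)) PySem.Dict.empty).getD k PySem.Dict.empty
      = pvVal1 d1 k := by
  have hitems := PySem.Dict.items_foldl_insert_fresh (l := d1.items) (k := Prod.fst)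
    (v := fun kv => if kv.2.items.isEmpty then PySem.Dict.empty else kv.2)
    (d := (PySem.Dict.empty : PySem.Dict String (PySem.Dict String String)))
    (by intro a _; exact PySem.Dict.contains_empty _)
    (by simpa [PySem.Dict.keys] using hnd)
  have hitems' : (d1.items.foldl (fun r kv => r.insert kv.1 (if kv.2.items.isEmpty then PySem.Dict.empty else kv.2)) PySem.Dict.empty).items
      = d1.items.map (fun kv => (kv.1, if kv.2.items.isEmpty then PySem.Dict.empty else kv.2)) := by
    simpa using hitems
  have hkeys : (d1.items.foldl (fun r kv => r.insert kv.1 (if kv.2.items.isEmpty then PySem.Dict.empty else kv.2)) PySem.Dict.empty).keys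
      = d1.keys := by
    simp only [PySem.Dict.keys, hitems', List.map_map]
    rfl
  have hknd : (d1.items.foldl (fun r kv => r.insert kv.1 (if kv.2.items.isEmpty then PySem.Dict.empty else kv.2)) PySem.Dict.empty).keys.Nodup := by
    rw [hkeys]; exact hnd
  cases h : d1.get? k with
  | none =>
    have hnmem : k ∉ d1.keys := (PySem.Dict.get?_eq_none_iff_not_mem_keys d1 k).mp h
    have : (d1.items.foldl (fun r kv => r.insert kv.1 (if kv.2.items.isEmpty then PySem.Dict.empty else kv.2)) PySem.Dict.empty).contains k = false := by
      rw [PySem.Dict.contains_eq_decide_mem_keys, hkeys]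
      simpa using hnmem
    rw [PySem.Dict.getD_of_not_contains _ _ this]
    simp [pvVal1, h]
  | some v =>
    have hmem : (k, v) ∈ d1.items := PySem.Dict.mem_items_of_get?_eq_some d1 h
    have hmem' : (k, if v.items.isEmpty then PySem.Dict.empty else v) ∈
        (d1.items.foldl (fun r kv => r.insert kv.1 (if kv.2.items.isEmpty then PySem.Dict.empty else kv.2)) PySem.Dict.empty).items := by
      rw [hitems']
      exact List.mem_map.mpr ⟨(k, v), hmem, rfl⟩
    rw [PySem.Dict.getD_of_mem_items _ hmem' hknd]
    simp [pvVal1, h]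

lemma mval_eq (dict1 : List (String × List (String × String))) (d2 : PySem.Dict String (PySem.Dict String String)) (k : String) :
    pvMval (pvToDict dict1) d2 k =
      match d2.get? k with
      | none => pvVal1 (pvToDict dict1) k
      | some v => if v.items.isEmpty then pvVal1 (pvToDict dict1) k
                  else (pvVal1 (pvToDict dict1) k).update v.items := by
  have hv0 : (match (pvToDict dict1).get? k with
      | some v => if v.items.isEmpty then PySem.Dict.empty else PySem.Dict.empty.update v.items
      | none => (PySem.Dict.empty : PySem.Dict String String)) = pvVal1 (pvToDict dict1) k := by
    cases h : (pvToDict dict1).get? k with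
    | none => simp [pvVal1, h]
    | some v =>
      simp only [pvVal1, h]
      rw [update_empty_eq v (values_nodup_pvToDict dict1 k v h)]
  simp only [pvMval, hv0]
  cases d2.get? k <;> rfl

-- ===== VERDICT (by name: the statement is the Claim_ definition above) =====
theorem merge_dict_with_sub_dict_spec : Claim_equal_merge_dict_with_sub_dict := by
  intro dict1 dict2 _
  unfold Spec_merge_dict_with_sub_dict
  have hA : merge_dict_with_sub_dict dict1 dict2 =
      ((PySem.Set.update (PySem.Set.update (PySem.Set.empty : PySem.Set String) (pvToDict dict1).keys) (pvToDict dict2).keys).foldl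
        (fun fd k => fd.insert k (pvMval (pvToDict dict1) (pvToDict dict2) k)) PySem.Dict.empty).items.map
        (fun p => (p.1, p.2.items)) := rfl
  have hB : merge_dict_with_sub_dict_alt dict1 dict2 =
      ((pvToDict dict2).items.foldl pvStep
        ((pvToDict dict1).items.foldl (fun r kv => r.insert kv.1 (if kv.2.items.isEmpty then PySem.Dict.empty else kv.2)) PySem.Dict.empty)).items.map
        (fun p => (p.1, p.2.items)) := rfl
  rw [hA, hB]
  set d1 := pvToDict dict1 with hd1
  set d2 := pvToDict dict2 with hd2
  set r1 := d1.items.foldl (fun r kv => r.insert kv.1 (if kv.2.items.isEmpty then PySem.Dict.empty else kv.2)) PySem.Dict.empty with hr1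
  set ks := PySem.Set.update (PySem.Set.update (PySem.Set.empty : PySem.Set String) d1.keys) d2.keys with hks
  have hnd1 : d1.keys.Nodup := PySem.Dict.nodup_keys_ofList _
  have hnd2 : d2.keys.Nodup := PySem.Dict.nodup_keys_ofList _
  have hks_nodup : ks.Nodup := PySem.Set.nodup_update _ _ (PySem.Set.nodup_update _ _ List.nodup_nil)
  -- r1's keys
  have hkeysr1 : r1.keys = d1.keys := by
    rw [hr1]
    have := PySem.Dict.keys_foldl_insert_key (l := d1.items) (key := Prod.fst)
      (f := fun _ kv => if kv.2.items.isEmpty then PySem.Dict.empty else kv.2)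
      (d := (PySem.Dict.empty : PySem.Dict String (PySem.Dict String String)))
    rw [this]
    have hmapfst : d1.items.map Prod.fst = d1.keys := rfl
    rw [hmapfst]
    show PySem.Set.update [] d1.keys = d1.keys
    rw [PySem.Set.update_nil_left, PySem.Set.ofList_eq_self_of_nodup _ hnd1]
  -- r2's keys
  have hkeysr2 : (d2.items.foldl pvStep r1).keys = ks := by
    rw [pass2_keys, hkeysr1]
    have hmapfst : d2.items.map Prod.fst = d2.keys := rfl
    rw [hmapfst, hks]
    show PySem.Set.update d1.keys d2.keys = PySem.Set.update (PySem.Set.update [] d1.keys) d2.keys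
    rw [PySem.Set.update_nil_left, PySem.Set.ofList_eq_self_of_nodup _ hnd1]
  have hnd2' : (d2.items.foldl pvStep r1).keys.Nodup := by rw [hkeysr2]; exact hks_nodup
  -- A's items
  have hitemsA : ((ks.foldl (fun fd k => fd.insert k (pvMval d1 d2 k)) PySem.Dict.empty).items)
      = ks.map (fun k => (k, pvMval d1 d2 k)) := itemsA (pvMval d1 d2) ks hks_nodup
  -- B's items
  have hitemsB : (d2.items.foldl pvStep r1).items
      = ks.map (fun k => (k, (d2.items.foldl pvStep r1).getD k PySem.Dict.empty)) := by
    rw [PySem.Dict.items_eq_map_keys _ hnd2' PySem.Dict.empty, hkeysr2]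
  rw [hitemsA, hitemsB, List.map_map, List.map_map]
  apply List.map_congr_left
  intro k _
  simp only [Function.comp]
  congr 1
  -- per-key value equality
  rw [pass2_getD d2.items (by simpa [PySem.Dict.keys] using hnd2) r1 k]
  have hlook : pvLook d2.items k = d2.get? k := by
    rw [pvLook_eq_get?]
  rw [hlook, getD_R1 d1 hnd1 k, mval_eq dict1 d2 k]
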